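-- pv_equiv track=rewrite | github.com/klienha/Python-Programming-Projects | Recursion.py | calc_res
-- ===== SOURCE A (Python) =====
-- def calc_res(some_list, res=0):
--
--     if len(some_list) == 0:
--         return res
--
--     if some_list[0] == 0:
--         res = calc_res(some_list[1:], res)
--     elif some_list[0] % 2 == 0:
--         res = calc_res(some_list[1:], res * some_list[0])
--     else:
--         res = calc_res(some_list[1:], res + some_list[0])
--
--     return res
-- ===== SOURCE B (Python) =====
-- def calc_res(some_list, res=0):
--     for x in some_list:
--         if x == 0:
--             continue
--         elif x % 2 == 0:
--             res = res * x
--         else: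
--             res = res + x
--     return res
-- ===== Notes on version B (the rewrite author's own statement) =====
-- stated objective: simpler
-- what changed: Replaced the recursion that copies the list with slicing at every call by a single iterative left-to-right loop over the elements maintaining the accumulator.
import Mathlib
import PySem

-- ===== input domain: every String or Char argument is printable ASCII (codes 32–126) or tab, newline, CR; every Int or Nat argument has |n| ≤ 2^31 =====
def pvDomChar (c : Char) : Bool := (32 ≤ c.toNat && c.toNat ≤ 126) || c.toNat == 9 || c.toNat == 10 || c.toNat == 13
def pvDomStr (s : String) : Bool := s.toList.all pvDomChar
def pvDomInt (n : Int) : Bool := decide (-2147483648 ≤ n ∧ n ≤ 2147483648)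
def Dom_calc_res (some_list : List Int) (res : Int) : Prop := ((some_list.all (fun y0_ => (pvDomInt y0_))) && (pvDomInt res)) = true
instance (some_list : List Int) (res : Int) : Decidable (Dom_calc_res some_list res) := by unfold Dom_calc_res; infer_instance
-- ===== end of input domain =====

-- B replaces the slicing recursion by a single left-to-right fold over the list (simpler decomposition, same values).


-- ===== PORT A =====
-- some_list[0] is the head and some_list[1:] the tail whenever len(some_list) ≠ 0
def calc_res : List Int → Int → Int
  | [], res => res
  | x :: rest, res =>
    if x == 0 then calc_res rest res
    else if PySem.Int.mod x 2 == 0 then calc_res rest (res * x)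
    else calc_res rest (res + x)

-- ===== PORT B =====
def calc_res_alt (some_list : List Int) (res : Int) : Int :=
  some_list.foldl (fun res x =>
    if x == 0 then res
    else if PySem.Int.mod x 2 == 0 then res * x
    else res + x) res

-- ===== PRECONDITION & SPEC =====
def Spec_calc_res (some_list : List Int) (res : Int) (out : Int) : Prop := out = calc_res_alt some_list res
instance (some_list : List Int) (res : Int) (out : Int) : Decidable (Spec_calc_res some_list res out) := by unfold Spec_calc_res; infer_instance

-- ===== CLAIM (what is proved, stated in full; the proofs are below) =====
def Claim_equal_calc_res : Prop := ∀ (some_list : List Int) (res : Int), Dom_calc_res some_list res → Spec_calc_res some_list res (calc_res some_list res)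

-- ===== LEMMAS AND PROOFS =====
theorem calc_res_eq_alt (some_list : List Int) (res : Int) :
    calc_res some_list res = calc_res_alt some_list res := by
  induction some_list generalizing res with
  | nil => rfl
  | cons x rest ih =>
    simp only [calc_res, calc_res_alt, List.foldl]
    split_ifs <;> simp_all [calc_res_alt]

-- ===== VERDICT (by name: the statement is the Claim_ definition above) =====
theorem calc_res_spec : Claim_equal_calc_res := by
  intro some_list res _
  exact calc_res_eq_alt some_list res
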